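-- pv_equiv track=rewrite | github.com/Dis-count/ProgrammingPractice | 336.py | numMovesStonesII
-- ===== SOURCE A (Python) =====
-- from typing import List
--
-- def numMovesStonesII(stones: List[int]) -> List[int]:
--     n = len(stones)
--     stones.sort()
--     if stones[-1] - stones[0] + 1 == n:
--         return [0, 0]
--     ma = max(stones[-2] - stones[0] + 1, stones[-1] - stones[1] + 1) - (n - 1)
--     mi = n
--     j = 0
--     for i in range(n):
--         while j + 1 < n and stones[j + 1] - stones[i] + 1 <= n:
--             j += 1
--         if j - i + 1 == n - 1 and stones[j] - stones[i] + 1 == n - 1: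
--             mi = min(mi, 2)
--         else:
--             mi = min(mi, n - (j - i + 1))
--     return [mi, ma]
-- ===== SOURCE B (Python) =====
-- from typing import List
--
-- # Hand-written equivalent of bisect.bisect_right (A's module imports only typing,
-- # so the bisect module is not available here).
-- def _bisect_right(a, x):
--     lo, hi = 0, len(a)
--     while lo < hi:
--         mid = (lo + hi) // 2
--         if x < a[mid]:
--             hi = mid
--         else:
--             lo = mid + 1
--     return lo
--
-- def numMovesStonesII(stones: List[int]) -> List[int]:
--     n = len(stones)
--     stones.sort()
--     if stones[-1] - stones[0] == n - 1:
--         return [0, 0]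
--     ma = max(stones[-2] - stones[0], stones[-1] - stones[1]) - n + 2
--     mi = n
--     for i in range(n):
--         j = _bisect_right(stones, stones[i] + n - 1) - 1
--         size = j - i + 1
--         mi = min(mi, 2 if size == n - 1 and stones[j] - stones[i] + 1 == n - 1 else n - size)
--     return [mi, ma]
-- ===== Notes on version B (the rewrite author's own statement) =====
-- stated objective: alternative
-- what changed: The amortized two-pointer carrying a monotonic window end j across iterations is replaced by an independent binary search (hand-written bisect_right, since A's module only imports typing) per i that locates the same window end; the loop state shrinks from (mi, j) to just mi.
import Mathlib
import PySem

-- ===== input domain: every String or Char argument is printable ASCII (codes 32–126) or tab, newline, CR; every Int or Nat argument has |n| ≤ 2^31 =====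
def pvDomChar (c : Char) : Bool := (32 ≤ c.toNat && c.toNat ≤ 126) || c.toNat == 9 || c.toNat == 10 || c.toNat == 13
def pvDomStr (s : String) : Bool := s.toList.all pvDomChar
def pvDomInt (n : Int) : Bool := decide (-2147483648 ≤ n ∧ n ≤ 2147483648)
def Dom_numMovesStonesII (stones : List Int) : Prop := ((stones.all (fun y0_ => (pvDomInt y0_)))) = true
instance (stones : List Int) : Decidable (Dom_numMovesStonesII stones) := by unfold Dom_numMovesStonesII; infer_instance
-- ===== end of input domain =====

-- B replaces A's carried monotonic window pointer by an independent binary search per index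
-- (objective: alternative decomposition, same result). Both A and B sort their argument in
-- place in Python; the equivalence proved here is about the return value.

-- ===== PORT A =====
-- the inner while loop of A: advance j while j+1 < n and stones[j+1] - stones[i] + 1 <= n
-- (fuel = stones.length always suffices, so this computes exactly the Python while loop)
def pvAdvA (s : List Int) (n si : Int) : Nat → Nat → Nat
  | 0, j => j
  | fuel + 1, j =>
      if ((j : Int) + 1 < n) ∧ (PySem.List.pyGetD s ((j : Int) + 1) 0 - si + 1 ≤ n) then
        pvAdvA s n si fuel (j + 1)
      else j

def numMovesStonesII (stones : List Int) : List Int :=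
  let n : Int := stones.length
  let s := PySem.List.sorted stones (fun x => x) false
  if PySem.List.pyGetD s (-1) 0 - PySem.List.pyGetD s 0 0 + 1 = n then [0, 0]
  else
    let ma := max (PySem.List.pyGetD s (-2) 0 - PySem.List.pyGetD s 0 0 + 1)
                  (PySem.List.pyGetD s (-1) 0 - PySem.List.pyGetD s 1 0 + 1) - (n - 1)
    let r := (PySem.List.pyRange 0 n 1).foldl (fun (acc : Int × Nat) i =>
        let si := PySem.List.pyGetD s i 0
        let j := pvAdvA s n si s.length acc.2
        let mi := if ((j : Int) - i + 1 = n - 1) ∧ (PySem.List.pyGetD s (j : Int) 0 - si + 1 = n - 1)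
                  then min acc.1 2 else min acc.1 (n - ((j : Int) - i + 1))
        (mi, j)) (n, 0)
    [r.1, ma]

-- ===== PORT B =====
-- Source B's hand-written _bisect_right is the textbook binary search loop
-- (mid = (lo+hi)//2, branch on x < a[mid]); PySem.List.bisectRight is that exact loop.
def numMovesStonesII_alt (stones : List Int) : List Int :=
  let n : Int := stones.length
  let s := PySem.List.sorted stones (fun x => x) false
  if PySem.List.pyGetD s (-1) 0 - PySem.List.pyGetD s 0 0 = n - 1 then [0, 0]
  else
    let ma := max (PySem.List.pyGetD s (-2) 0 - PySem.List.pyGetD s 0 0)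
                  (PySem.List.pyGetD s (-1) 0 - PySem.List.pyGetD s 1 0) - n + 2
    let mi := (PySem.List.pyRange 0 n 1).foldl (fun (mi : Int) i =>
        let si := PySem.List.pyGetD s i 0
        let j : Int := (PySem.List.bisectRight s (si + n - 1) : Int) - 1
        let size := j - i + 1
        min mi (if size = n - 1 ∧ PySem.List.pyGetD s j 0 - si + 1 = n - 1 then 2 else n - size)) n
    [mi, ma]

-- ===== PRECONDITION & SPEC =====
-- Pre_ excludes only the empty list, on which A raises IndexError (stones[-1]).
def Pre_numMovesStonesII (stones : List Int) : Prop := stones ≠ []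
instance (stones : List Int) : Decidable (Pre_numMovesStonesII stones) := by unfold Pre_numMovesStonesII; infer_instance
def pvWitness_numMovesStonesII : List Int := [2, 5, 9]

def Spec_numMovesStonesII (stones : List Int) (out : List Int) : Prop := out = numMovesStonesII_alt stones
instance (stones : List Int) (out : List Int) : Decidable (Spec_numMovesStonesII stones out) := by unfold Spec_numMovesStonesII; infer_instance

-- ===== CLAIM (what is proved, stated in full; the proofs are below) =====
def Claim_equal_numMovesStonesII : Prop := ∀ (stones : List Int), Dom_numMovesStonesII stones → Pre_numMovesStonesII stones → Spec_numMovesStonesII stones (numMovesStonesII stones)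

-- ===== LEMMAS AND PROOFS =====

-- "r is the last index of the window for target x": r in range, s[r] <= x, and s[r+1] > x if it exists
def pvP (s : List Int) (x : Int) (r : Nat) : Prop :=
  r < s.length ∧ s.getD r 0 ≤ x ∧ (r + 1 < s.length → x < s.getD (r + 1) 0)

lemma pvMono (s : List Int) (hs : List.Pairwise (· ≤ ·) s) {i j : Nat}
    (hij : i ≤ j) (hj : j < s.length) : s.getD i 0 ≤ s.getD j 0 := by
  rcases eq_or_lt_of_le hij with h | h
  · subst h; exact le_refl _
  · have hi : i < s.length := lt_trans h hj
    rw [List.getD_eq_getElem s 0 hi, List.getD_eq_getElem s 0 hj]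
    exact List.pairwise_iff_getElem.mp hs i j hi hj h

lemma pvP_unique (s : List Int) (hs : List.Pairwise (· ≤ ·) s) {x : Int} {r₁ r₂ : Nat}
    (h₁ : pvP s x r₁) (h₂ : pvP s x r₂) : r₁ = r₂ := by
  obtain ⟨hl₁, hle₁, hgt₁⟩ := h₁
  obtain ⟨hl₂, hle₂, hgt₂⟩ := h₂
  rcases lt_trichotomy r₁ r₂ with h | h | h
  · have h1 := hgt₁ (by omega)
    have h2 := pvMono s hs (show r₁ + 1 ≤ r₂ by omega) hl₂
    omega
  · exact h
  · have h1 := hgt₂ (by omega)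
    have h2 := pvMono s hs (show r₂ + 1 ≤ r₁ by omega) hl₁
    omega

lemma pvAdvA_P (s : List Int) (si : Int) :
    ∀ (fuel j : Nat), j < s.length → s.getD j 0 ≤ si + (s.length : Int) - 1 →
      s.length ≤ fuel + j + 1 →
      pvP s (si + (s.length : Int) - 1) (pvAdvA s (s.length : Int) si fuel j) := by
  intro fuel
  induction fuel with
  | zero =>
    intro j hj hx hfuel
    rw [pvAdvA]
    exact ⟨hj, hx, by omega⟩
  | succ fuel ih =>
    intro j hj hx hfuel
    rw [pvAdvA]
    by_cases hc : ((j : Int) + 1 < (s.length : Int)) ∧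
        (PySem.List.pyGetD s ((j : Int) + 1) 0 - si + 1 ≤ (s.length : Int))
    · rw [if_pos hc]
      obtain ⟨hc1, hc2⟩ := hc
      have hj1 : j + 1 < s.length := by omega
      have hget : PySem.List.pyGetD s ((j : Int) + 1) 0 = s.getD (j + 1) 0 := by
        rw [show ((j : Int) + 1) = ((j + 1 : Nat) : Int) by push_cast; ring]
        exact PySem.List.pyGetD_natCast s (j + 1) 0
      refine ih (j + 1) hj1 ?_ (by omega)
      rw [hget] at hc2; omega
    · rw [if_neg hc]
      refine ⟨hj, hx, ?_⟩
      intro hlt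
      have hget : PySem.List.pyGetD s ((j : Int) + 1) 0 = s.getD (j + 1) 0 := by
        rw [show ((j : Int) + 1) = ((j + 1 : Nat) : Int) by push_cast; ring]
        exact PySem.List.pyGetD_natCast s (j + 1) 0
      by_contra hle
      exact hc ⟨by omega, by rw [hget]; omega⟩

lemma pvBisect_P (s : List Int) (hs : List.Pairwise (· ≤ ·) s) (x : Int) (k : Nat)
    (hk : k < s.length) (hx : s.getD k 0 ≤ x) :
    1 ≤ PySem.List.bisectRight s x ∧ pvP s x (PySem.List.bisectRight s x - 1) := by
  obtain ⟨hle, h2, h3⟩ := PySem.List.bisectRight_spec s x hs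
  have hb1 : 1 ≤ PySem.List.bisectRight s x := by
    by_contra h
    have := h3 k hk (by omega)
    rw [List.getD_eq_getElem s 0 hk] at hx
    omega
  refine ⟨hb1, by omega, ?_, ?_⟩
  · have hr : PySem.List.bisectRight s x - 1 < s.length := by omega
    rw [List.getD_eq_getElem s 0 hr]
    exact h2 _ hr (by omega)
  · intro hlt
    rw [List.getD_eq_getElem s 0 hlt]
    exact h3 _ hlt (by omega)

lemma pvLoop_eq (s : List Int) (hs : List.Pairwise (· ≤ ·) s) :
    ∀ (b a : Nat) (mi : Int) (j : Nat), a + b ≤ s.length →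
      (b = 0 ∨ (j < s.length ∧ s.getD j 0 ≤ s.getD a 0 + (s.length : Int) - 1)) →
      ((List.range' a b).foldl (fun (x : Int × Nat) (y : Nat) =>
          (if (↑(pvAdvA s (↑s.length) (PySem.List.pyGetD s (↑y) 0) s.length x.2) : Int) - (↑y : Int) + 1 = (↑s.length : Int) - 1 ∧
              PySem.List.pyGetD s (↑(pvAdvA s (↑s.length) (PySem.List.pyGetD s (↑y) 0) s.length x.2)) 0 -
                PySem.List.pyGetD s (↑y) 0 + 1 = (↑s.length : Int) - 1 then
            min x.1 2
          else min x.1 ((↑s.length : Int) - ((↑(pvAdvA s (↑s.length) (PySem.List.pyGetD s (↑y) 0) s.length x.2) : Int) - (↑y : Int) + 1)),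
          pvAdvA s (↑s.length) (PySem.List.pyGetD s (↑y) 0) s.length x.2)) (mi, j)).1
      = (List.range' a b).foldl (fun (x : Int) (y : Nat) =>
          min x (if (↑(PySem.List.bisectRight s (PySem.List.pyGetD s (↑y) 0 + (↑s.length : Int) - 1)) : Int) - 1 - (↑y : Int) + 1 = (↑s.length : Int) - 1 ∧
              PySem.List.pyGetD s ((↑(PySem.List.bisectRight s (PySem.List.pyGetD s (↑y) 0 + (↑s.length : Int) - 1)) : Int) - 1) 0 -
                PySem.List.pyGetD s (↑y) 0 + 1 = (↑s.length : Int) - 1 then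
            (2 : Int)
          else (↑s.length : Int) - ((↑(PySem.List.bisectRight s (PySem.List.pyGetD s (↑y) 0 + (↑s.length : Int) - 1)) : Int) - 1 - (↑y : Int) + 1))) mi := by
  intro b
  induction b with
  | zero => intro a mi j _ _; simp
  | succ b ih =>
    intro a mi j hab hj
    rcases hj with hj | ⟨hjl, hjx⟩
    · omega
    have ha : a < s.length := by omega
    have hgeta : PySem.List.pyGetD s ((a : Nat) : Int) 0 = s.getD a 0 := PySem.List.pyGetD_natCast s a 0
    rw [List.range'_succ, List.foldl_cons, List.foldl_cons]
    simp only [hgeta]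
    have hPA : pvP s (s.getD a 0 + (s.length : Int) - 1)
        (pvAdvA s (s.length : Int) (s.getD a 0) s.length j) :=
      pvAdvA_P s (s.getD a 0) s.length j hjl hjx (by omega)
    obtain ⟨hb1, hPB⟩ := pvBisect_P s hs (s.getD a 0 + (s.length : Int) - 1) a ha (by omega)
    have hjeq : pvAdvA s (s.length : Int) (s.getD a 0) s.length j =
        PySem.List.bisectRight s (s.getD a 0 + (s.length : Int) - 1) - 1 :=
      pvP_unique s hs hPA hPB
    have hc : (↑(PySem.List.bisectRight s (s.getD a 0 + (s.length : Int) - 1)) : Int) - 1 =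
        (↑(pvAdvA s (s.length : Int) (s.getD a 0) s.length j) : Int) := by omega
    rw [hc, apply_ite (min mi)]
    have hnext : b = 0 ∨ (pvAdvA s (s.length : Int) (s.getD a 0) s.length j < s.length ∧
        s.getD (pvAdvA s (s.length : Int) (s.getD a 0) s.length j) 0 ≤
          s.getD (a + 1) 0 + (s.length : Int) - 1) := by
      rcases Nat.eq_zero_or_pos b with hb | hb
      · exact Or.inl hb
      · refine Or.inr ⟨hPA.1, ?_⟩
        have ha1 : a + 1 < s.length := by omega
        have hm := pvMono s hs (show a ≤ a + 1 by omega) ha1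
        have := hPA.2.1
        omega
    exact ih (a + 1) _ _ (by omega) hnext

-- ===== VERDICT (by name: the statement is the Claim_ definition above) =====
theorem numMovesStonesII_spec : Claim_equal_numMovesStonesII := by
  intro stones _ hpre
  unfold Spec_numMovesStonesII numMovesStonesII numMovesStonesII_alt
  simp only []
  have hs := PySem.List.sorted_pairwise stones (fun x => x)
  have hlen : (PySem.List.sorted stones (fun x => x) false).length = stones.length :=
    PySem.List.length_sorted stones (fun x => x) false
  set s := PySem.List.sorted stones (fun x => x) false with hsdef
  have h0 : stones.length ≠ 0 := fun h => hpre (List.eq_nil_of_length_eq_zero h)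
  have hlen1 : 1 ≤ s.length := by omega
  by_cases hc : PySem.List.pyGetD s (-1) 0 - PySem.List.pyGetD s 0 0 + 1 = (stones.length : Int)
  · rw [if_pos hc, if_pos (show PySem.List.pyGetD s (-1) 0 - PySem.List.pyGetD s 0 0 = (stones.length : Int) - 1 by omega)]
  · rw [if_neg hc, if_neg (show ¬ (PySem.List.pyGetD s (-1) 0 - PySem.List.pyGetD s 0 0 = (stones.length : Int) - 1) by omega)]
    have hrange : PySem.List.pyRange 0 (stones.length : Int) 1 =
        (List.range stones.length).map (fun (k : Nat) => (k : Int)) :=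
      PySem.List.pyRange_zero_natCast stones.length
    rw [hrange, List.foldl_map, List.foldl_map, List.range_eq_range', ← hlen]
    congr 1
    · exact pvLoop_eq s hs s.length 0 (s.length : Int) 0 (by omega) (Or.inr ⟨by omega, by omega⟩)
    · congr 1
      omega
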